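-- pv_equiv track=rewrite | github.com/ComputationalBiology-CS-CU/prob_tensor_decomp | data_prepare/eQTL_v6_script/try.py | get_individual_id
-- ===== SOURCE A (Python) =====
-- def get_individual_id(s):
-- 	## naively find the second '-'
-- 	id = ''
-- 	count = 0
-- 	for i in range(len(s)):
-- 		if s[i] == '-':
-- 			count += 1
--
-- 		if count == 2:
-- 			break
--
-- 		id += s[i]
--
-- 	return id
-- ===== SOURCE B (Python) =====
-- def get_individual_id(s):
--     return '-'.join(s.split('-')[:2])
-- ===== Notes on version B (the rewrite author's own statement) =====
-- stated objective: faster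
-- what changed: Replaces the character-by-character scan with a hyphen counter and quadratic string += accumulation by a single field-based split, a slice of the first two fields, and one join.
import Mathlib
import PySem

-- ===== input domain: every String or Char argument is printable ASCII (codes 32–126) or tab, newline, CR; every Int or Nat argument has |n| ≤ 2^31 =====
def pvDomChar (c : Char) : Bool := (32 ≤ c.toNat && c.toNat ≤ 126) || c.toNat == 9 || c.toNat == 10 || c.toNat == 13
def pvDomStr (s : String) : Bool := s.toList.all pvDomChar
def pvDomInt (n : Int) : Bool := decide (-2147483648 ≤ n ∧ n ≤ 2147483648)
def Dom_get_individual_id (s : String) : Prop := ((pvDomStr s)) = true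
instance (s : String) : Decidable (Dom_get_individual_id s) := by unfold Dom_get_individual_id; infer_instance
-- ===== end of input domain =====

-- B replaces A's char-by-char scan with a hyphen counter by split('-')[:2] rejoined with '-' (idiomatic; same return value).

-- ===== PORT A =====
-- A's loop: walk the characters, count hyphens, break when the count reaches 2, else append the char.
def pvGoA : List Char → Int → List Char → List Char
  | [], _, id => id
  | c :: rest, count, id =>
    let count := if c == '-' then count + 1 else count
    if count == 2 then id else pvGoA rest count (id ++ [c])

def get_individual_id (s : String) : String := String.ofList (pvGoA s.toList 0 [])

-- ===== PORT B =====
-- '-'.join(s.split('-')[:2])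
def get_individual_id_alt (s : String) : String :=
  String.ofList (PySem.Chars.join ['-'] (PySem.List.slice (PySem.Chars.splitOn s.toList ['-']) none (some 2)))

-- ===== PRECONDITION & SPEC =====
def Spec_get_individual_id (s : String) (out : String) : Prop := out = get_individual_id_alt s
instance (s : String) (out : String) : Decidable (Spec_get_individual_id s out) := by unfold Spec_get_individual_id; infer_instance

-- ===== CLAIM (what is proved, stated in full; the proofs are below) =====
def Claim_equal_get_individual_id : Prop := ∀ (s : String), Dom_get_individual_id s → Spec_get_individual_id s (get_individual_id s)

-- ===== LEMMAS AND PROOFS =====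

-- Reference split on a single '-' separator, with the pending (already read) field `pre` up front.
def pvSplit (pre : List Char) : List Char → List (List Char)
  | [] => [pre]
  | c :: rest => if c = '-' then pre :: pvSplit [] rest else pvSplit (pre ++ [c]) rest

-- Reference result: everything before the second hyphen.
def pvRef : List Char → List Char
  | [] => []
  | c :: rest => if c = '-' then '-' :: rest.takeWhile (· ≠ '-') else c :: pvRef rest

lemma pvGoA_one (cs : List Char) (id : List Char) :
    pvGoA cs 1 id = id ++ cs.takeWhile (· ≠ '-') := by
  induction cs generalizing id with
  | nil => simp [pvGoA]
  | cons c rest ih =>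
    by_cases h : c = '-' <;> simp [pvGoA, h, ih]

lemma pvGoA_ref (cs : List Char) (id : List Char) :
    pvGoA cs 0 id = id ++ pvRef cs := by
  induction cs generalizing id with
  | nil => simp [pvGoA, pvRef]
  | cons c rest ih =>
    by_cases h : c = '-'
    · simp [pvGoA, pvRef, h, pvGoA_one]
    · simp [pvGoA, pvRef, h, ih]

lemma pvSplit_head (cs : List Char) (pre : List Char) :
    pvSplit pre cs = (pre ++ cs.takeWhile (· ≠ '-')) :: (pvSplit pre cs).tail := by
  induction cs generalizing pre with
  | nil => simp [pvSplit]
  | cons c rest ih =>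
    by_cases h : c = '-'
    · simp [pvSplit, h]
    · simpa [pvSplit, h, List.takeWhile_cons] using ih (pre ++ [c])

lemma pvSplit_join (cs : List Char) (pre : List Char) :
    PySem.Chars.join ['-'] ((pvSplit pre cs).take 2) = pre ++ pvRef cs := by
  induction cs generalizing pre with
  | nil => simp [pvSplit, pvRef, PySem.Chars.join_singleton]
  | cons c rest ih =>
    by_cases h : c = '-'
    · rw [pvSplit, if_pos h, pvSplit_head rest []]
      simp [pvRef, h, PySem.Chars.join, List.intercalate]
    · rw [pvSplit, if_neg h, ih]
      simp [pvRef, h]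

-- PySem's fuel-based splitOn coincides with pvSplit for the one-character separator '-'.
lemma pvSplitOn_go (fuel : Nat) (l cur : List Char) (acc : List (List Char)) (h : l.length < fuel) :
    PySem.Chars.splitOn.go ['-'] fuel l cur acc
      = acc.reverse ++ pvSplit cur.reverse l := by
  induction fuel generalizing l cur acc with
  | zero => omega
  | succ f ih =>
    cases l with
    | nil => rw [PySem.Chars.splitOn.go.eq_def]; simp [pvSplit]
    | cons c rest =>
      by_cases hc : c = '-'
      · have hp : List.isPrefixOf ['-'] (c :: rest) = true := by
          simp [List.isPrefixOf, hc]
        rw [PySem.Chars.splitOn.go.eq_def]; simp only []; rw [if_pos hp]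
        have := ih rest [] (cur.reverse :: acc) (by simpa using Nat.lt_of_succ_lt_succ h)
        
        rw [show (List.drop ([(Char.ofNat 45)].length) (c :: rest)) = rest by simp]
        rw [this]
        simp [pvSplit, hc]
      · have hp : List.isPrefixOf ['-'] (c :: rest) = false := by
          simp [List.isPrefixOf]
          intro hcontra; exact hc hcontra.symm
        rw [PySem.Chars.splitOn.go.eq_def]; simp only []; rw [if_neg (by simp [hp])]
        rw [ih rest (c :: cur) acc (by simpa using Nat.lt_of_succ_lt_succ h)]
        simp [pvSplit, hc]

lemma pvSplitOn_eq (cs : List Char) :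
    PySem.Chars.splitOn cs ['-'] = pvSplit [] cs := by
  have := pvSplitOn_go (cs.length + 1) cs [] [] (by omega)
  simpa [PySem.Chars.splitOn] using this

-- ===== VERDICT (by name: the statement is the Claim_ definition above) =====
theorem get_individual_id_spec : Claim_equal_get_individual_id := by
  intro s _
  unfold Spec_get_individual_id get_individual_id get_individual_id_alt
  rw [pvSplitOn_eq, pvGoA_ref]
  rw [show PySem.List.slice (pvSplit [] s.toList) none (some 2)
        = (pvSplit [] s.toList).take 2 from by
      simpa using PySem.List.slice_to_natCast (pvSplit [] s.toList) 2]
  rw [pvSplit_join]
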